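-- pv_equiv track=rewrite | github.com/AnVales/code_signal_arcade | 3 - Smooth Sailing/sortBy Height.py | solution
-- ===== SOURCE A (Python) =====
-- def solution(a):
--
--     # Sort the list and eliminate the -1 values
--     a_sorted = sorted(a)
--     a_sorted = [i for i in a_sorted if i != -1]
--
--     # Initialise values
--     a_final = []
--     counter = 0
--
--     # Replace with the numbers that are sorted but maintains the -1 values
--     for i in range(len(a)):
--         if a[i] == -1:
--             a_final.append(a[i])
--             counter = counter - 1
--
--         else:
--             a_final.append(a_sorted[i+counter])
--
--     return a_final
-- ===== SOURCE B (Python) =====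
-- def solution(a):
--     # Incremental: walk a once; keep -1 slots fixed and insert each new height
--     # into the already-sorted non-(-1) slots of the partial result (insertion
--     # sort interleaved with the gaps; no library sort, no index bookkeeping).
--     res = []
--     for x in a:
--         if x == -1:
--             res.append(-1)
--         else:
--             out = []
--             carry = x
--             for v in res:
--                 if v == -1:
--                     out.append(-1)
--                 elif carry <= v:
--                     out.append(carry)
--                     carry = v
--                 else:
--                     out.append(v)
--             out.append(carry)
--             res = out
--     return res
-- ===== Notes on version B (the rewrite author's own statement) =====
-- stated objective: alternative
-- what changed: A calls the library sort on the whole list, filters out the -1s, and rebuilds the output by scanning every index with an offset counter into the sorted copy; B never calls sort at all: it walks the input once and inserts each height into the already-sorted non-(-1) slots of the partial result (an incremental insertion sort interleaved with the fixed -1 gaps), trading the O(n log n) sort for a sort-free O(n^2) incremental pass.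
import Mathlib
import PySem

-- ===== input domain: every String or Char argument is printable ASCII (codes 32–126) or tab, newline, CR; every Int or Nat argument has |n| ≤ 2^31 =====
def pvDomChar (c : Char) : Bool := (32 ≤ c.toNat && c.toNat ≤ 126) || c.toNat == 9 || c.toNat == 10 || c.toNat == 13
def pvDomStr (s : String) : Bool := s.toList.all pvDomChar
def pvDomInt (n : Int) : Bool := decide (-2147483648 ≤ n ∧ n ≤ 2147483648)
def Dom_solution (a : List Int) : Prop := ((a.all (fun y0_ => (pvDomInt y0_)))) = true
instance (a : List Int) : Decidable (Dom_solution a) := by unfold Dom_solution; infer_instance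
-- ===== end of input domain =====

-- B replaces A's library-sort-plus-offset-counter scan by a sort-free incremental pass that
-- inserts each height into the already-sorted non-(-1) slots of the partial result (alternative).

-- ===== PORT A =====
-- a[i] and a_sorted[i+counter] are ported with pyGetD (default 0): both indices are provably
-- in range on every input (i ∈ range(len(a)); i+counter counts the non-(-1) prefix), so the
-- default is never read and A raises on no input.
def solution (a : List Int) : List Int :=
  let aSorted := (PySem.List.sorted a (fun x => x) false).filter (fun x => decide (x ≠ -1))
  ((PySem.List.pyRange 0 (a.length : Int) 1).foldl
    (fun (st : List Int × Int) (i : Int) =>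
      if PySem.List.pyGetD a i 0 = -1 then
        (st.1 ++ [PySem.List.pyGetD a i 0], st.2 - 1)
      else
        (st.1 ++ [PySem.List.pyGetD aSorted (i + st.2) 0], st.2))
    ([], 0)).1

-- ===== PORT B =====
-- outer loop over a; inner loop over res with the (out, carry) pair as its state.
def solution_alt (a : List Int) : List Int :=
  a.foldl (fun res x =>
    if x = -1 then res ++ [-1]
    else
      let st := res.foldl (fun (st : List Int × Int) v =>
        if v = -1 then (st.1 ++ [-1], st.2)
        else if st.2 ≤ v then (st.1 ++ [st.2], v)
        else (st.1 ++ [v], st.2)) ([], x)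
      st.1 ++ [st.2]) []

-- ===== PRECONDITION & SPEC =====
def Spec_solution (a : List Int) (out : List Int) : Prop := out = solution_alt a
instance (a : List Int) (out : List Int) : Decidable (Spec_solution a out) := by unfold Spec_solution; infer_instance

-- ===== CLAIM (what is proved, stated in full; the proofs are below) =====
def Claim_equal_solution : Prop := ∀ (a : List Int), Dom_solution a → Spec_solution a (solution a)

-- ===== LEMMAS AND PROOFS =====

-- Common skeleton of both results: walk a, keep -1 in place, otherwise take the next value of s.
def pvMergeD : List Int → List Int → List Int
  | [], _ => []
  | x :: t, s => if x = -1 then x :: pvMergeD t s else s.headD 0 :: pvMergeD t s.tail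

-- one insertion pass: carry x rightward until it fits, then shift the rest
def pvPass : Int → List Int → List Int
  | x, [] => [x]
  | x, v :: s => if x ≤ v then x :: pvPass v s else v :: pvPass x s

-- B's inner loop, as structural recursion on res (with the -1 slots transparent)
def pvIns : List Int → Int → List Int
  | [], x => [x]
  | v :: t, x =>
    if v = -1 then -1 :: pvIns t x
    else if x ≤ v then x :: pvIns t v else v :: pvIns t x

-- the sorted values accumulated by B's outer loop
def pvS (p : List Int) : List Int :=
  p.foldl (fun s x => if x = -1 then s else pvPass x s) []

-- filtering the -1s out of sorted(a) = sorting the non-(-1) values of a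
lemma pv_sortfilter (a : List Int) :
    (PySem.List.sorted a (fun x => x) false).filter (fun x => decide (x ≠ -1))
      = PySem.List.sorted (a.filter (fun x => decide (x ≠ -1))) (fun x => x) false := by
  refine (PySem.List.sorted_id_eq_of_perm_of_pairwise
    (a.filter (fun x => decide (x ≠ -1)))
    ((PySem.List.sorted a (fun x => x) false).filter (fun x => decide (x ≠ -1)))
    ((PySem.List.sorted_perm a (fun x => x) false).filter _)
    ((PySem.List.sorted_pairwise a (fun x => x)).filter _)).symm

-- A's loop, characterised: state after processing prefix of length j with counter r - j
lemma pv_loopA (a s : List Int) :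
    ∀ (t : List Int) (j r : Nat) (af : List Int), a.drop j = t →
    ((PySem.List.pyRange (j : Int) (a.length : Int) 1).foldl
      (fun (st : List Int × Int) (i : Int) =>
        if PySem.List.pyGetD a i 0 = -1 then
          (st.1 ++ [PySem.List.pyGetD a i 0], st.2 - 1)
        else
          (st.1 ++ [PySem.List.pyGetD s (i + st.2) 0], st.2))
      (af, (r : Int) - (j : Int))).1
      = af ++ pvMergeD t (s.drop r) := by
  intro t
  induction t with
  | nil =>
    intro j r af h
    have hj : a.length ≤ j := List.drop_eq_nil_iff.mp h
    have hnil : PySem.List.pyRange (j : Int) (a.length : Int) 1 = [] :=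
      PySem.List.pyRange_one_eq_nil (show ((a.length : Nat) : Int) ≤ ((j : Nat) : Int) by
        exact_mod_cast hj)
    rw [hnil]
    simp [pvMergeD]
  | cons x t ih =>
    intro j r af h
    have hjl : j < a.length := by
      by_contra hc
      rw [List.drop_eq_nil_iff.mpr (by omega : a.length ≤ j)] at h
      simp at h
    have hx : a[j]? = some x := by
      rw [← List.head?_drop, h]; rfl
    have hget : PySem.List.pyGetD a (j : Int) 0 = x := by
      simp [PySem.List.pyGetD_natCast, List.getD, hx]
    have hdrop : a.drop (j + 1) = t := by
      rw [← List.tail_drop, h]; rfl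
    rw [PySem.List.pyRange_one_cons (by exact_mod_cast hjl)]
    simp only [List.foldl_cons, hget]
    have hj1 : (j : Int) + 1 = ((j + 1 : Nat) : Int) := by push_cast; ring
    by_cases hxe : x = -1
    · rw [if_pos (by simpa [hget] using hxe)]
      have h1 : (r : Int) - (j : Int) - 1 = (r : Int) - ((j + 1 : Nat) : Int) := by push_cast; ring
      rw [h1, hj1, ih (j + 1) r (af ++ [x]) hdrop]
      simp [pvMergeD, hxe]
    · rw [if_neg (by simpa [hget] using hxe)]
      have hidx : (j : Int) + ((r : Int) - (j : Int)) = (r : Nat) := by ring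
      have hval : PySem.List.pyGetD s ((j : Int) + ((r : Int) - (j : Int))) 0
          = (s.drop r).headD 0 := by
        rw [hidx, PySem.List.pyGetD_natCast]
        simp [List.getD, List.headD_eq_head?_getD, List.head?_drop]
      have hcnt : (r : Int) - (j : Int) = ((r + 1 : Nat) : Int) - ((j + 1 : Nat) : Int) := by
        push_cast; ring
      rw [hval, hcnt, hj1, ih (j + 1) (r + 1) (af ++ [(s.drop r).headD 0]) hdrop]
      simp [pvMergeD, hxe, List.tail_drop]

lemma pv_solution_merge (a : List Int) :
    solution a = pvMergeD a (PySem.List.sorted (a.filter (fun x => decide (x ≠ -1))) (fun x => x) false) := by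
  have h := pv_loopA a
    ((PySem.List.sorted a (fun x => x) false).filter (fun x => decide (x ≠ -1)))
    a 0 0 [] (by simp)
  simp only [Nat.cast_zero, sub_zero, List.drop_zero, List.nil_append] at h
  show (_ : List Int × Int).1 = _
  rw [h, pv_sortfilter]

-- B's inner foldl with the (out, carry) pair = the recursion pvIns
lemma pv_inner_eq : ∀ (res : List Int) (x : Int) (acc : List Int),
    (let st := res.foldl (fun (st : List Int × Int) v =>
        if v = -1 then (st.1 ++ [-1], st.2)
        else if st.2 ≤ v then (st.1 ++ [st.2], v) else (st.1 ++ [v], st.2)) (acc, x)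
     st.1 ++ [st.2]) = acc ++ pvIns res x := by
  intro res
  induction res with
  | nil => intro x acc; simp [pvIns]
  | cons v t ih =>
    intro x acc
    simp only [List.foldl_cons, pvIns]
    by_cases hv : v = -1
    · rw [if_pos hv, if_pos hv, ih x (acc ++ [-1])]
      simp
    · rw [if_neg hv, if_neg hv]
      by_cases hx : x ≤ v
      · rw [if_pos hx, if_pos hx, ih v (acc ++ [x])]
        simp
      · rw [if_neg hx, if_neg hx, ih x (acc ++ [v])]
        simp

-- appending a -1 slot to the shape appends -1 to the merge
lemma pv_merge_append_neg : ∀ (p s : List Int),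
    pvMergeD (p ++ [-1]) s = pvMergeD p s ++ [-1] := by
  intro p
  induction p with
  | nil => intro s; simp [pvMergeD]
  | cons x t ih =>
    intro s
    by_cases hx : x = -1 <;> simp [pvMergeD, hx, ih]

-- the key step: inserting x into the merged prefix = merging the extended shape with pvPass x s
lemma pv_ins_merge : ∀ (p s : List Int) (x c : Int), x ≠ -1 → c ≠ -1 →
    (∀ y ∈ s, y ≠ -1) → s.length = (p.filter (fun z => decide (z ≠ -1))).length →
    pvIns (pvMergeD p s) x = pvMergeD (p ++ [c]) (pvPass x s) := by
  intro p
  induction p with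
  | nil =>
    intro s x c hx hc hs hlen
    have : s = [] := List.eq_nil_of_length_eq_zero (by simpa using hlen)
    subst this
    simp [pvMergeD, pvIns, pvPass, hc]
  | cons h t ih =>
    intro s x c hx hc hs hlen
    by_cases hh : h = -1
    · subst hh
      have h1 : pvMergeD (-1 :: t) s = -1 :: pvMergeD t s := by simp [pvMergeD]
      have h2 : pvMergeD ((-1 :: t) ++ [c]) (pvPass x s)
          = -1 :: pvMergeD (t ++ [c]) (pvPass x s) := by simp [pvMergeD]
      rw [h1, h2]
      simp [pvIns, ih s x c hx hc hs (by simpa using hlen)]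
    · match s with
      | [] => simp [hh, List.length_cons] at hlen
      | w :: s' =>
        have hw : w ≠ -1 := hs w (by simp)
        have hs' : ∀ y ∈ s', y ≠ -1 := fun y hy => hs y (by simp [hy])
        have hlen' : s'.length = (t.filter (fun z => decide (z ≠ -1))).length := by
          simpa [List.filter_cons, hh] using hlen
        simp only [pvMergeD, if_neg hh, List.headD, List.tail_cons, pvIns, if_neg hw,
          List.cons_append]
        by_cases hxw : x ≤ w
        · rw [if_pos hxw, ih s' w c hw hc hs' hlen']
          simp [pvPass, hxw]
        · rw [if_neg hxw, ih s' x c hx hc hs' hlen']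
          simp [pvPass, hxw]

-- pvPass x s is a rearrangement of x :: s
lemma pv_pass_perm : ∀ (s : List Int) (x : Int), (pvPass x s).Perm (x :: s) := by
  intro s
  induction s with
  | nil => intro x; simp [pvPass]
  | cons v t ih =>
    intro x
    by_cases hxv : x ≤ v
    · simpa [pvPass, hxv] using (ih v).cons x
    · refine List.Perm.trans ?_ (List.Perm.swap x v t)
      simpa [pvPass, hxv] using (ih x).cons v

-- pvPass preserves sortedness
lemma pv_pass_pairwise : ∀ (s : List Int) (x : Int),
    s.Pairwise (· ≤ ·) → (pvPass x s).Pairwise (· ≤ ·) := by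
  intro s
  induction s with
  | nil => intro x _; simp [pvPass]
  | cons v t ih =>
    intro x hp
    rw [List.pairwise_cons] at hp
    by_cases hxv : x ≤ v
    · rw [pvPass, if_pos hxv, List.pairwise_cons]
      refine ⟨fun y hy => ?_, ih v hp.2⟩
      rcases List.mem_cons.mp ((pv_pass_perm t v).mem_iff.mp hy) with h | h
      · exact h ▸ hxv
      · exact le_trans hxv (hp.1 y h)
    · rw [pvPass, if_neg hxv, List.pairwise_cons]
      refine ⟨fun y hy => ?_, ih x hp.2⟩
      rcases List.mem_cons.mp ((pv_pass_perm t x).mem_iff.mp hy) with h | h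
      · subst h; omega
      · exact hp.1 y h

-- the accumulated values are a rearrangement of the non-(-1) values seen so far
lemma pv_S_fold_perm : ∀ (p s : List Int),
    (p.foldl (fun s x => if x = -1 then s else pvPass x s) s).Perm
      (s ++ p.filter (fun z => decide (z ≠ -1))) := by
  intro p
  induction p with
  | nil => intro s; simp
  | cons x t ih =>
    intro s
    by_cases hx : x = -1
    · simpa [List.foldl_cons, hx, List.filter_cons] using ih s
    · simp only [List.foldl_cons, if_neg hx, List.filter_cons, decide_eq_true_eq]
      rw [if_pos hx]
      refine List.Perm.trans (ih (pvPass x s)) ?_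
      refine List.Perm.trans (List.Perm.append_right _ (pv_pass_perm s x)) ?_
      simpa using List.perm_middle.symm

lemma pv_S_perm (p : List Int) : (pvS p).Perm (p.filter (fun z => decide (z ≠ -1))) := by
  simpa using pv_S_fold_perm p []

-- the accumulated values stay sorted
lemma pv_S_fold_pairwise : ∀ (p s : List Int), s.Pairwise (· ≤ ·) →
    (p.foldl (fun s x => if x = -1 then s else pvPass x s) s).Pairwise (· ≤ ·) := by
  intro p
  induction p with
  | nil => intro s hs; simpa using hs
  | cons x t ih =>
    intro s hs
    by_cases hx : x = -1
    · simpa [List.foldl_cons, hx] using ih s hs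
    · simp only [List.foldl_cons, if_neg hx]
      exact ih (pvPass x s) (pv_pass_pairwise s x hs)

lemma pv_S_pairwise (p : List Int) : (pvS p).Pairwise (· ≤ ·) :=
  pv_S_fold_pairwise p [] (by simp)

-- B's outer loop, characterised: after the prefix p the result is the merge of p with pvS p
lemma pv_loopB (a : List Int) :
    a.foldl (fun res x =>
      if x = -1 then res ++ [-1]
      else
        let st := res.foldl (fun (st : List Int × Int) v =>
          if v = -1 then (st.1 ++ [-1], st.2)
          else if st.2 ≤ v then (st.1 ++ [st.2], v) else (st.1 ++ [v], st.2)) ([], x)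
        st.1 ++ [st.2]) []
      = pvMergeD a (pvS a) := by
  induction a using List.reverseRecOn with
  | nil => simp [pvMergeD]
  | append_singleton p x ih =>
    rw [List.foldl_append, List.foldl_cons, List.foldl_nil, ih]
    by_cases hx : x = -1
    · rw [if_pos hx, hx, pv_merge_append_neg]
      simp [pvS, List.foldl_append]
    · rw [if_neg hx, pv_inner_eq (pvMergeD p (pvS p)) x [], List.nil_append]
      have hmem : ∀ y ∈ pvS p, y ≠ -1 := by
        intro y hy
        have := (pv_S_perm p).mem_iff.mp hy
        simpa using (List.of_mem_filter this)
      have hlen : (pvS p).length = (p.filter (fun z => decide (z ≠ -1))).length :=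
        (pv_S_perm p).length_eq
      rw [pv_ins_merge p (pvS p) x x hx hx hmem hlen]
      simp [pvS, List.foldl_append, hx]

lemma pv_solution_alt_merge (a : List Int) :
    solution_alt a = pvMergeD a (PySem.List.sorted (a.filter (fun x => decide (x ≠ -1))) (fun x => x) false) := by
  have hS : PySem.List.sorted (a.filter (fun x => decide (x ≠ -1))) (fun x => x) false = pvS a :=
    PySem.List.sorted_id_eq_of_perm_of_pairwise _ _ (pv_S_perm a) (pv_S_pairwise a)
  rw [hS]
  exact pv_loopB a

-- ===== VERDICT (by name: the statement is the Claim_ definition above) =====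
theorem solution_spec : Claim_equal_solution := by
  intro a _
  show solution a = solution_alt a
  rw [pv_solution_merge, pv_solution_alt_merge]
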